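-- pv_equiv track=rewrite | github.com/Coderrexe/aegis-pennapps-2025 | backend/app.py | _generate_real_time_alerts
-- ===== SOURCE A (Python) =====
-- def _get_district_summary(crimes):
--     district_counts = {}
--     for crime in crimes:
--         district = crime.get('district', 'Unknown')
--         if district:
--             district_counts[district] = district_counts.get(district, 0) + 1
--     return dict(sorted(district_counts.items(), key=lambda x: x[1], reverse=True))
--
-- def _generate_real_time_alerts(crimes):
--     alerts = []
--     breaking_crimes = [c for c in crimes if c.get('is_breaking')]
--     if breaking_crimes:
--         alerts.append({
--             'type': 'breaking',
--             'message': f'{len(breaking_crimes)} crimes reported in the last hour',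
--             'severity': 'high' if len(breaking_crimes) > 3 else 'medium'
--         })
--     high_severity_crimes = [c for c in crimes if c.get('severity') == 'high']
--     if len(high_severity_crimes) > 5:
--         alerts.append({
--             'type': 'cluster',
--             'message': f'{len(high_severity_crimes)} high-severity crimes in recent period',
--             'severity': 'high'
--         })
--     district_summary = _get_district_summary(crimes)
--     if district_summary:
--         most_active_district = max(district_summary.items(), key=lambda x: x[1])
--         if most_active_district[1] > 10:
--             alerts.append({
--                 'type': 'hotspot',
--                 'message': f'District {most_active_district[0]} has {most_active_district[1]} recent incidents',
--                 'severity': 'medium'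
--             })
--     return alerts
-- ===== SOURCE B (Python) =====
-- def _generate_real_time_alerts(crimes):
--     breaking_count = 0
--     high_severity_count = 0
--     district_counts = {}
--     for c in crimes:
--         if c.get('is_breaking'):
--             breaking_count += 1
--         if c.get('severity') == 'high':
--             high_severity_count += 1
--         district = c.get('district', 'Unknown')
--         if district:
--             district_counts[district] = district_counts.get(district, 0) + 1
--     alerts = []
--     if breaking_count != 0:
--         alerts.append({
--             'type': 'breaking',
--             'message': f'{breaking_count} crimes reported in the last hour',
--             'severity': 'high' if breaking_count > 3 else 'medium'
--         })
--     if high_severity_count > 5: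
--         alerts.append({
--             'type': 'cluster',
--             'message': f'{high_severity_count} high-severity crimes in recent period',
--             'severity': 'high'
--         })
--     if district_counts:
--         name, count = max(district_counts.items(), key=lambda x: x[1])
--         if count > 10:
--             alerts.append({
--                 'type': 'hotspot',
--                 'message': f'District {name} has {count} recent incidents',
--                 'severity': 'medium'
--             })
--     return alerts
-- ===== Notes on version B (the rewrite author's own statement) =====
-- stated objective: simpler
-- what changed: Replaces A's three separate scans (two filtered list builds plus a helper that builds a dict and sorts it by count) with one fused loop accumulating two counters and a district-count dict, then builds the alerts directly, taking the hotspot district by max over the unsorted dict (first maximal in insertion order, which equals A's max over the stable descending sort); the helper and its sort are gone.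
import Mathlib
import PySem

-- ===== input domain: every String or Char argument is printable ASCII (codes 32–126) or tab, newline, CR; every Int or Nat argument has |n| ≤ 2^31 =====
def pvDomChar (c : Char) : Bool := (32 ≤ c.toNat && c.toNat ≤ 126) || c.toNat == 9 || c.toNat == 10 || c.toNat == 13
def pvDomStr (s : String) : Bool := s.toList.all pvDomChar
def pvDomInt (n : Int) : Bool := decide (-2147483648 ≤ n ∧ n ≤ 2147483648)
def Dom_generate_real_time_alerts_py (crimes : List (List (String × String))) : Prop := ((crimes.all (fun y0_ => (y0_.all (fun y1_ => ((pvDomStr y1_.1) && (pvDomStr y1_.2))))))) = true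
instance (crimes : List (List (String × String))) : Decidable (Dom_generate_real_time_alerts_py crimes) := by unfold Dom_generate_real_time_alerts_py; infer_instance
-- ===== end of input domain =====

-- B fuses A's three scans (two filters + a count-dict helper with a sort) into one loop and drops the sort,
-- taking the hotspot district by max over the unsorted count dict: a simpler decomposition, same results.

-- ===== PORT A =====
-- helper _get_district_summary: build count dict, return it sorted by count descending
def pvGetDistrictSummary (crimes : List (List (String × String))) : PySem.Dict String Int :=
  let district_counts := crimes.foldl (fun (d : PySem.Dict String Int) crime =>
    let district := (List.lookup "district" crime).getD "Unknown"
    if district ≠ "" then d.modify district 0 (· + 1) else d) PySem.Dict.empty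
  PySem.Dict.ofList (PySem.List.sorted district_counts.items (fun x => x.2) true)

def generate_real_time_alerts_py (crimes : List (List (String × String))) : List (List (String × String)) :=
  let alerts : List (List (String × String)) := []
  let breaking_crimes := crimes.filter (fun c => (List.lookup "is_breaking" c).getD "" ≠ "")
  let alerts := if breaking_crimes ≠ [] then
      alerts ++ [[("type", "breaking"),
                  ("message", PySem.Int.toStr (breaking_crimes.length : Int) ++ " crimes reported in the last hour"),
                  ("severity", if (breaking_crimes.length : Int) > 3 then "high" else "medium")]]
    else alerts
  let high_severity_crimes := crimes.filter (fun c => List.lookup "severity" c = some "high")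
  let alerts := if (high_severity_crimes.length : Int) > 5 then
      alerts ++ [[("type", "cluster"),
                  ("message", PySem.Int.toStr (high_severity_crimes.length : Int) ++ " high-severity crimes in recent period"),
                  ("severity", "high")]]
    else alerts
  let district_summary := pvGetDistrictSummary crimes
  if district_summary.items ≠ [] then
    match PySem.List.max? district_summary.items (fun x => x.2) with
    | some most_active_district =>
        if most_active_district.2 > 10 then
          alerts ++ [[("type", "hotspot"),
                      ("message", "District " ++ most_active_district.1 ++ " has " ++ PySem.Int.toStr most_active_district.2 ++ " recent incidents"),
                      ("severity", "medium")]]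
        else alerts
    | none => alerts  -- unreachable: the dict is nonempty (Python's max is guarded the same way)
  else alerts

-- ===== PORT B =====
def generate_real_time_alerts_py_alt (crimes : List (List (String × String))) : List (List (String × String)) :=
  let st := crimes.foldl (fun (st : Int × Int × PySem.Dict String Int) c =>
      let bc := if (List.lookup "is_breaking" c).getD "" ≠ "" then st.1 + 1 else st.1
      let hc := if List.lookup "severity" c = some "high" then st.2.1 + 1 else st.2.1
      let district := (List.lookup "district" c).getD "Unknown"
      let d := if district ≠ "" then st.2.2.modify district 0 (· + 1) else st.2.2
      (bc, hc, d)) (0, 0, PySem.Dict.empty)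
  (if st.1 ≠ 0 then
      [[("type", "breaking"),
        ("message", PySem.Int.toStr st.1 ++ " crimes reported in the last hour"),
        ("severity", if st.1 > 3 then "high" else "medium")]]
    else []) ++
  (if st.2.1 > 5 then
      [[("type", "cluster"),
        ("message", PySem.Int.toStr st.2.1 ++ " high-severity crimes in recent period"),
        ("severity", "high")]]
    else []) ++
  (if st.2.2.items ≠ [] then
      match PySem.List.max? st.2.2.items (fun x => x.2) with
      | some m =>
          if m.2 > 10 then
            [[("type", "hotspot"),
              ("message", "District " ++ m.1 ++ " has " ++ PySem.Int.toStr m.2 ++ " recent incidents"),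
              ("severity", "medium")]]
          else []
      | none => []  -- unreachable: the dict is nonempty (Source B's max is guarded the same way)
    else [])

-- ===== PRECONDITION & SPEC =====
def Spec_generate_real_time_alerts_py (crimes : List (List (String × String))) (out : List (List (String × String))) : Prop := out = generate_real_time_alerts_py_alt crimes
instance (crimes : List (List (String × String))) (out : List (List (String × String))) : Decidable (Spec_generate_real_time_alerts_py crimes out) := by unfold Spec_generate_real_time_alerts_py; infer_instance

-- ===== CLAIM (what is proved, stated in full; the proofs are below) =====
def Claim_equal_generate_real_time_alerts_py : Prop := ∀ (crimes : List (List (String × String))), Dom_generate_real_time_alerts_py crimes → Spec_generate_real_time_alerts_py crimes (generate_real_time_alerts_py crimes)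

-- ===== LEMMAS AND PROOFS =====

-- the max?-step function, for readability in the lemmas below
def pvStep (acc : Option (String × Int)) (x : String × Int) : Option (String × Int) :=
  match acc with
  | none => some x
  | some m => if m.2 < x.2 then some x else some m

theorem pvMax?_eq_foldl (l : List (String × Int)) :
    PySem.List.max? l (fun x => x.2) = l.foldl pvStep none := by
  unfold PySem.List.max?
  congr 1
  funext acc x
  cases acc <;> rfl

-- a fold of pvStep from some m never moves off m if nothing exceeds m
theorem pvFoldKeep (t : List (String × Int)) (m : String × Int)
    (h : ∀ z ∈ t, z.2 ≤ m.2) : t.foldl pvStep (some m) = some m := by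
  induction t with
  | nil => rfl
  | cons y ys ih =>
      have hy : ¬ m.2 < y.2 := not_lt.2 (h y (by simp))
      simp only [List.foldl_cons, pvStep, if_neg hy]
      exact ih (fun z hz => h z (by simp [hz]))

-- inserting into a descending-sorted list commutes with taking the first maximum
theorem pvMaxInsert (x : String × Int) (s : List (String × Int))
    (hs : s.Pairwise (fun a b => b.2 ≤ a.2)) :
    (PySem.List.insertBy (fun a b => decide (b.2 < a.2)) x s).foldl pvStep none =
      pvStep (s.foldl pvStep none) x := by
  induction s with
  | nil => rfl
  | cons y ys ih =>
      have hpw : ∀ z ∈ ys, z.2 ≤ y.2 := fun z hz => (List.pairwise_cons.1 hs).1 z hz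
      have hys : ys.Pairwise (fun a b => b.2 ≤ a.2) := (List.pairwise_cons.1 hs).2
      by_cases hxy : y.2 < x.2
      · have : PySem.List.insertBy (fun a b => decide (b.2 < a.2)) x (y :: ys) = x :: y :: ys := by
          simp [PySem.List.insertBy, hxy]
        rw [this]
        have hall : ∀ z ∈ y :: ys, z.2 ≤ x.2 := by
          intro z hz
          rcases List.mem_cons.1 hz with h | h
          · exact h ▸ le_of_lt hxy
          · exact le_trans (hpw z h) (le_of_lt hxy)
        have lhs : (x :: y :: ys).foldl pvStep none = some x := by
          simp only [List.foldl_cons, pvStep]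
          exact pvFoldKeep _ _ (fun z hz => hall z hz)
        have rhs : (y :: ys).foldl pvStep none = some y := by
          simp only [List.foldl_cons, pvStep]
          exact pvFoldKeep _ _ hpw
        rw [lhs, rhs]
        simp [pvStep, hxy]
      · have : PySem.List.insertBy (fun a b => decide (b.2 < a.2)) x (y :: ys) =
            y :: PySem.List.insertBy (fun a b => decide (b.2 < a.2)) x ys := by
          simp [PySem.List.insertBy, hxy]
        rw [this]
        have hall : ∀ z ∈ PySem.List.insertBy (fun a b => decide (b.2 < a.2)) x ys, z.2 ≤ y.2 := by
          intro z hz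
          rcases (PySem.List.mem_insertBy _ _ _ _).1 hz with h | h
          · exact h ▸ not_lt.1 hxy
          · exact hpw z h
        have lhs : (y :: PySem.List.insertBy (fun a b => decide (b.2 < a.2)) x ys).foldl pvStep none = some y := by
          simp only [List.foldl_cons, pvStep]
          exact pvFoldKeep _ _ hall
        have rhs : (y :: ys).foldl pvStep none = some y := by
          simp only [List.foldl_cons, pvStep]
          exact pvFoldKeep _ _ hpw
        rw [lhs, rhs]
        simp [pvStep, hxy]

-- first maximum of the stable descending sort = first maximum of the original list
theorem pvMaxSorted (l : List (String × Int)) :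
    PySem.List.max? (PySem.List.sorted l (fun x => x.2) true) (fun x => x.2) =
      PySem.List.max? l (fun x => x.2) := by
  induction l using List.reverseRecOn with
  | nil => rfl
  | append_singleton l x ih =>
      rw [pvMax?_eq_foldl, pvMax?_eq_foldl] at *
      rw [PySem.List.sorted_rev_eq_foldl_insertBy, List.foldl_append, List.foldl_append]
      simp only [List.foldl_cons, List.foldl_nil]
      rw [← PySem.List.sorted_rev_eq_foldl_insertBy]
      rw [pvMaxInsert x _ (PySem.List.sorted_pairwise_rev l (fun x => x.2)), ih]

-- the count dict's keys stay nodup through the loop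
theorem pvNodupKeys (l : List (List (String × String))) (d : PySem.Dict String Int)
    (hd : d.keys.Nodup) :
    (l.foldl (fun (d : PySem.Dict String Int) crime =>
      if (List.lookup "district" crime).getD "Unknown" ≠ "" then
        d.modify ((List.lookup "district" crime).getD "Unknown") 0 (· + 1)
      else d) d).keys.Nodup := by
  induction l generalizing d with
  | nil => exact hd
  | cons c cs ih =>
      simp only [List.foldl_cons]
      apply ih
      split
      · rw [PySem.Dict.keys_modify]
        exact PySem.Dict.nodup_keys_insert _ _ _ hd
      · exact hd

-- dict(pairs) with nodup keys has exactly those items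
theorem pvOfListItems (s : List (String × Int)) (hs : (s.map Prod.fst).Nodup) :
    (PySem.Dict.ofList s).items = s := by
  have h := PySem.Dict.items_foldl_insert_fresh s Prod.fst Prod.snd PySem.Dict.empty
    (fun a _ => by simp [PySem.Dict.contains, PySem.Dict.empty]) hs
  simpa [PySem.Dict.ofList, PySem.Dict.update, PySem.Dict.empty] using h

-- the fused loop computes the two filter lengths and the same count dict
theorem pvFused (l : List (List (String × String))) (b h : Int) (d : PySem.Dict String Int) :
    l.foldl (fun (st : Int × Int × PySem.Dict String Int) c =>
      ((if (List.lookup "is_breaking" c).getD "" ≠ "" then st.1 + 1 else st.1),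
       (if List.lookup "severity" c = some "high" then st.2.1 + 1 else st.2.1),
       (if (List.lookup "district" c).getD "Unknown" ≠ "" then
          st.2.2.modify ((List.lookup "district" c).getD "Unknown") 0 (· + 1)
        else st.2.2))) (b, h, d) =
    (b + ((l.filter (fun c => (List.lookup "is_breaking" c).getD "" ≠ "")).length : Int),
     h + ((l.filter (fun c => List.lookup "severity" c = some "high")).length : Int),
     l.foldl (fun (d : PySem.Dict String Int) crime =>
       if (List.lookup "district" crime).getD "Unknown" ≠ "" then
         d.modify ((List.lookup "district" crime).getD "Unknown") 0 (· + 1)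
       else d) d) := by
  induction l generalizing b h d with
  | nil => simp
  | cons c cs ih =>
      simp only [List.foldl_cons, List.filter_cons]
      rw [ih]
      by_cases h1 : (List.lookup "is_breaking" c).getD "" ≠ "" <;>
        by_cases h2 : List.lookup "severity" c = some "high" <;>
          simp [h1, h2] <;> omega

-- ===== VERDICT (by name: the statement is the Claim_ definition above) =====
theorem generate_real_time_alerts_py_spec : Claim_equal_generate_real_time_alerts_py := by
  intro crimes _
  unfold Spec_generate_real_time_alerts_py
  unfold generate_real_time_alerts_py generate_real_time_alerts_py_alt pvGetDistrictSummary
  dsimp only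
  rw [pvFused]
  set dc := crimes.foldl (fun (d : PySem.Dict String Int) crime =>
    if (List.lookup "district" crime).getD "Unknown" ≠ "" then
      d.modify ((List.lookup "district" crime).getD "Unknown") 0 (· + 1)
    else d) PySem.Dict.empty with hdc
  have hnodup : dc.keys.Nodup :=
    pvNodupKeys crimes PySem.Dict.empty (by simp [PySem.Dict.keys, PySem.Dict.empty])
  have hperm : (PySem.List.sorted dc.items (fun x => x.2) true).Perm dc.items :=
    PySem.List.sorted_perm dc.items (fun x => x.2) true
  have hnodup' : ((PySem.List.sorted dc.items (fun x => x.2) true).map Prod.fst).Nodup :=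
    (hperm.map Prod.fst).nodup_iff.2 hnodup
  rw [pvOfListItems _ hnodup', pvMaxSorted]
  rcases hm : PySem.List.max? dc.items (fun x => x.2) with _ | m <;>
    [simp only [zero_add, ne_eq, Int.natCast_eq_zero, List.length_eq_zero_iff,
       PySem.List.sorted_eq_nil_iff];
     simp only [hm, zero_add, ne_eq, Int.natCast_eq_zero, List.length_eq_zero_iff,
       PySem.List.sorted_eq_nil_iff]] <;>
    split_ifs <;> simp
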